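-- pv_equiv track=rewrite | github.com/TheDukeVin/AMP | dinner/student/my_dinner.py | filter_bad_invites
-- ===== SOURCE A (Python) =====
-- def filter_bad_invites(all_subsets:list, friends:dict)-> list:
--     '''Checks the given combinations to see if the combination contains any pair of guests
--        who dislike each other and removes the combination if that is the case
--
--        Example
--        -------
--        >>>friends={
--            'Alice':['Bob'],
--            'Bob':['Alice', 'Eve'],
--            'Eve':['Bob']
--        }
--        >>>filter_bad_invites(generate_all_subsets(friends), friends)
--        [[], ['Eve'], ['Bob'], ['Alice'], ['Alice', 'Eve']]
--     '''
--     good_invites = []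
--
--     for subset in all_subsets:
--         valid = True
--         for key, adj in friends.items():
--             for other in adj:
--                 if key in subset and other in subset:
--                     valid = False
--         if valid:
--             good_invites.append(subset)
--
--     return good_invites
-- ===== SOURCE B (Python) =====
-- def filter_bad_invites(all_subsets: list, friends: dict) -> list:
--     # Build the dislike-edge index once, instead of rescanning friends per subset.
--     self_bad = set()
--     bad_pairs = set()
--     for key, adj in friends.items():
--         for other in adj:
--             if other == key:
--                 self_bad.add(key)
--             else:
--                 bad_pairs.add((key, other))
--     good_invites = []
--     for subset in all_subsets:
--         if any(g in self_bad for g in subset):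
--             continue
--         if any((x, y) in bad_pairs for x in subset for y in subset):
--             continue
--         good_invites.append(subset)
--     return good_invites
-- ===== Notes on version B (the rewrite author's own statement) =====
-- stated objective: faster
-- what changed: B precomputes a hashed index of disliking pairs (split into self-dislikes and ordered cross pairs) in one pass over friends, then validates each subset against its own members' pairs instead of rescanning the whole friends graph per subset.
import Mathlib
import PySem

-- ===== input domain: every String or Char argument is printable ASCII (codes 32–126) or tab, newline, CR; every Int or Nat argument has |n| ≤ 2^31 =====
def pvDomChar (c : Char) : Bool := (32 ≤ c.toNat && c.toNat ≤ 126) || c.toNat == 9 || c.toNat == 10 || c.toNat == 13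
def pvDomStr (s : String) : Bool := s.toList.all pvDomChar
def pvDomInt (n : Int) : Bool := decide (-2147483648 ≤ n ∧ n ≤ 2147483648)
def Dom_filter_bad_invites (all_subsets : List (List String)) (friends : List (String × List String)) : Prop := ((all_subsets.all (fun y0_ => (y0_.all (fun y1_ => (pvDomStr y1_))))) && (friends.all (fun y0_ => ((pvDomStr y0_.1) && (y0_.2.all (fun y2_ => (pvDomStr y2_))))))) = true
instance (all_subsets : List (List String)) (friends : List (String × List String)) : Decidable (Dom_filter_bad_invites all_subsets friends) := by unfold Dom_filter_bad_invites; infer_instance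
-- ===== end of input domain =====

-- B builds a hashed dislike-edge index once and checks each subset against its own pairs,
-- instead of A's rescan of the whole friends graph for every subset (objective: faster).

-- ===== PORT A =====
def filter_bad_invites (all_subsets : List (List String)) (friends : List (String × List String)) : List (List String) :=
  all_subsets.foldl (fun good_invites subset =>
    let valid := friends.foldl (fun valid kv =>
      kv.2.foldl (fun valid other =>
        if subset.contains kv.1 && subset.contains other then false else valid) valid) true
    if valid then good_invites ++ [subset] else good_invites) []

-- ===== PORT B =====
-- the one-pass index build: (self_bad, bad_pairs)
def pvBuildIdx (friends : List (String × List String)) : PySem.Set String × PySem.Set (String × String) :=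
  friends.foldl (fun st kv =>
    kv.2.foldl (fun st other =>
      if other == kv.1 then (PySem.Set.add st.1 kv.1, st.2)
      else (st.1, PySem.Set.add st.2 (kv.1, other))) st)
    (PySem.Set.empty, PySem.Set.empty)

def filter_bad_invites_alt (all_subsets : List (List String)) (friends : List (String × List String)) : List (List String) :=
  let idx := pvBuildIdx friends
  all_subsets.foldl (fun good subset =>
    if subset.any (fun g => PySem.Set.contains idx.1 g) then good
    else if subset.any (fun x => subset.any (fun y => PySem.Set.contains idx.2 (x, y))) then good
    else good ++ [subset]) []

-- ===== PRECONDITION & SPEC =====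
def Spec_filter_bad_invites (all_subsets : List (List String)) (friends : List (String × List String)) (out : List (List String)) : Prop := out = filter_bad_invites_alt all_subsets friends
instance (all_subsets : List (List String)) (friends : List (String × List String)) (out : List (List String)) : Decidable (Spec_filter_bad_invites all_subsets friends out) := by unfold Spec_filter_bad_invites; infer_instance

-- ===== CLAIM (what is proved, stated in full; the proofs are below) =====
def Claim_equal_filter_bad_invites : Prop := ∀ (all_subsets : List (List String)) (friends : List (String × List String)), Dom_filter_bad_invites all_subsets friends → Spec_filter_bad_invites all_subsets friends (filter_bad_invites all_subsets friends)

-- ===== LEMMAS AND PROOFS =====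

-- A's "latch to false" loop computes v && !(any p)
lemma foldl_latch_false {α : Type} (p : α → Bool) (l : List α) (v : Bool) :
    l.foldl (fun v x => if p x then false else v) v = (v && !l.any p) := by
  induction l generalizing v with
  | nil => simp
  | cons a l ih => rw [List.foldl_cons, ih]; cases h : p a <;> simp [h]

lemma foldl_and {α : Type} (q : α → Bool) (l : List α) (v : Bool) :
    l.foldl (fun v x => v && q x) v = (v && l.all q) := by
  induction l generalizing v with
  | nil => simp
  | cons a l ih => rw [List.foldl_cons, ih]; simp [Bool.and_assoc]

-- characterization of A's inner validity flag
lemma A_valid_char (subset : List String) (friends : List (String × List String)) :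
    friends.foldl (fun valid kv =>
      kv.2.foldl (fun valid other =>
        if subset.contains kv.1 && subset.contains other then false else valid) valid) true
    = !friends.any (fun kv => kv.2.any (fun o => subset.contains kv.1 && subset.contains o)) := by
  have hfun : (fun (valid : Bool) (kv : String × List String) =>
      kv.2.foldl (fun valid other =>
        if subset.contains kv.1 && subset.contains other then false else valid) valid)
      = (fun v kv => v && !kv.2.any (fun o => subset.contains kv.1 && subset.contains o)) := by
    funext v kv; exact foldl_latch_false _ _ v
  rw [hfun, foldl_and, Bool.eq_iff_iff]
  simp [List.all_eq_true, List.any_eq_true]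

-- membership in the built index
lemma buildIdx_inner_self (k : String) (adj : List String)
    (st : PySem.Set String × PySem.Set (String × String)) (x : String) :
    x ∈ (adj.foldl (fun st other =>
      if other == k then (PySem.Set.add st.1 k, st.2)
      else (st.1, PySem.Set.add st.2 (k, other))) st).1
    ↔ x ∈ st.1 ∨ (x = k ∧ k ∈ adj) := by
  induction adj generalizing st with
  | nil => simp
  | cons a adj ih =>
    by_cases h : a = k
    · subst h; rw [List.foldl_cons, ih]; simp [PySem.Set.mem_add]; tauto
    · rw [List.foldl_cons, ih]; simp [h]; tauto

lemma buildIdx_inner_pair (k : String) (adj : List String)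
    (st : PySem.Set String × PySem.Set (String × String)) (p : String × String) :
    p ∈ (adj.foldl (fun st other =>
      if other == k then (PySem.Set.add st.1 k, st.2)
      else (st.1, PySem.Set.add st.2 (k, other))) st).2
    ↔ p ∈ st.2 ∨ ∃ o ∈ adj, o ≠ k ∧ p = (k, o) := by
  induction adj generalizing st with
  | nil => simp
  | cons a adj ih =>
    by_cases h : a = k
    · subst h; rw [List.foldl_cons, ih]; simp
    · rw [List.foldl_cons, ih]; simp [h, PySem.Set.mem_add]; tauto

lemma buildIdx_fold_self (friends : List (String × List String))
    (st : PySem.Set String × PySem.Set (String × String)) (x : String) :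
    x ∈ (friends.foldl (fun st kv =>
      kv.2.foldl (fun st other =>
        if other == kv.1 then (PySem.Set.add st.1 kv.1, st.2)
        else (st.1, PySem.Set.add st.2 (kv.1, other))) st) st).1
    ↔ x ∈ st.1 ∨ ∃ kv ∈ friends, x = kv.1 ∧ kv.1 ∈ kv.2 := by
  induction friends generalizing st with
  | nil => simp
  | cons kv friends ih =>
    rw [List.foldl_cons, ih]; simp only [buildIdx_inner_self, List.mem_cons]
    constructor
    · rintro ((h | h) | ⟨kv', h1, h2⟩)
      · exact Or.inl h
      · exact Or.inr ⟨kv, Or.inl rfl, h⟩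
      · exact Or.inr ⟨kv', Or.inr h1, h2⟩
    · rintro (h | ⟨kv', (rfl | h1), h2⟩)
      · exact Or.inl (Or.inl h)
      · exact Or.inl (Or.inr h2)
      · exact Or.inr ⟨kv', h1, h2⟩

lemma buildIdx_fold_pair (friends : List (String × List String))
    (st : PySem.Set String × PySem.Set (String × String)) (p : String × String) :
    p ∈ (friends.foldl (fun st kv =>
      kv.2.foldl (fun st other =>
        if other == kv.1 then (PySem.Set.add st.1 kv.1, st.2)
        else (st.1, PySem.Set.add st.2 (kv.1, other))) st) st).2
    ↔ p ∈ st.2 ∨ ∃ kv ∈ friends, ∃ o ∈ kv.2, o ≠ kv.1 ∧ p = (kv.1, o) := by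
  induction friends generalizing st with
  | nil => simp
  | cons kv friends ih =>
    rw [List.foldl_cons, ih]; simp only [buildIdx_inner_pair, List.mem_cons]
    constructor
    · rintro ((h | ⟨o, ho, hne, rfl⟩) | ⟨kv', h1, h2⟩)
      · exact Or.inl h
      · exact Or.inr ⟨kv, Or.inl rfl, o, ho, hne, rfl⟩
      · exact Or.inr ⟨kv', Or.inr h1, h2⟩
    · rintro (h | ⟨kv', (rfl | h1), h2⟩)
      · exact Or.inl (Or.inl h)
      · exact Or.inl (Or.inr h2)
      · exact Or.inr ⟨kv', h1, h2⟩

lemma mem_buildIdx_self (friends : List (String × List String)) (x : String) :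
    x ∈ (pvBuildIdx friends).1 ↔ ∃ kv ∈ friends, x = kv.1 ∧ kv.1 ∈ kv.2 := by
  unfold pvBuildIdx
  rw [buildIdx_fold_self]
  simp [PySem.Set.empty]

lemma mem_buildIdx_pair (friends : List (String × List String)) (p : String × String) :
    p ∈ (pvBuildIdx friends).2 ↔ ∃ kv ∈ friends, ∃ o ∈ kv.2, o ≠ kv.1 ∧ p = (kv.1, o) := by
  unfold pvBuildIdx
  rw [buildIdx_fold_pair]
  simp [PySem.Set.empty]

-- the per-subset decision of A equals the per-subset decision of B
lemma valid_eq (subset : List String) (friends : List (String × List String)) :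
    friends.any (fun kv => kv.2.any (fun o => subset.contains kv.1 && subset.contains o))
    = (subset.any (fun g => PySem.Set.contains (pvBuildIdx friends).1 g)
       || subset.any (fun x => subset.any (fun y => PySem.Set.contains (pvBuildIdx friends).2 (x, y)))) := by
  rw [Bool.eq_iff_iff]
  simp only [List.any_eq_true, Bool.and_eq_true, Bool.or_eq_true, List.contains_eq_mem,
    decide_eq_true_eq, PySem.Set.contains_iff, mem_buildIdx_self, mem_buildIdx_pair]
  constructor
  · rintro ⟨kv, hkv, o, ho, hk, hoS⟩
    by_cases h : o = kv.1
    · exact Or.inl ⟨kv.1, hk, kv, hkv, rfl, h ▸ ho⟩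
    · exact Or.inr ⟨kv.1, hk, o, hoS, kv, hkv, o, ho, h, rfl⟩
  · rintro (⟨g, hgS, kv, hkv, rfl, hself⟩ | ⟨x, hxS, y, hyS, kv, hkv, o, ho, _, heq⟩)
    · exact ⟨kv, hkv, kv.1, hself, hgS, hgS⟩
    · obtain ⟨h1, h2⟩ := Prod.mk.injEq .. ▸ heq
      exact ⟨kv, hkv, o, ho, h1 ▸ hxS, h2 ▸ hyS⟩

-- ===== VERDICT (by name: the statement is the Claim_ definition above) =====
theorem filter_bad_invites_spec : Claim_equal_filter_bad_invites := by
  intro all_subsets friends _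
  unfold Spec_filter_bad_invites filter_bad_invites filter_bad_invites_alt
  have hfun : (fun (good_invites : List (List String)) (subset : List String) =>
      let valid := friends.foldl (fun valid kv =>
        kv.2.foldl (fun valid other =>
          if subset.contains kv.1 && subset.contains other then false else valid) valid) true
      if valid then good_invites ++ [subset] else good_invites)
      = (fun good subset =>
      if subset.any (fun g => PySem.Set.contains (pvBuildIdx friends).1 g) then good
      else if subset.any (fun x => subset.any (fun y => PySem.Set.contains (pvBuildIdx friends).2 (x, y))) then good
      else good ++ [subset]) := by
    funext good subset
    show (if friends.foldl _ true then good ++ [subset] else good) = _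
    rw [A_valid_char, valid_eq subset friends]
    cases h1 : subset.any (fun g => PySem.Set.contains (pvBuildIdx friends).1 g) <;>
    cases h2 : subset.any (fun x => subset.any (fun y => PySem.Set.contains (pvBuildIdx friends).2 (x, y))) <;>
    simp
  rw [hfun]
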